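-- pv_equiv track=rewrite | github.com/pypi-data/pypi-mirror-56 | packages/coat/coat-0.6.tar.gz/coat-0.6/coat/ImageCoating.py | _filling
-- ===== SOURCE A (Python) =====
-- from types import GeneratorType
--
-- def _filling(vertical: int, horizontal: int, fill_direction=0) -> GeneratorType:
--     """ Create 2D range generator based on fillinf direction (left to right or top to down)
--
--     Args:
--         vertical (int): Description
--         horizontal (int): Description
--         fill_direction (int, optional): Description
--
--     Yields:
--         GeneratorType: Description
--     """
--     if fill_direction:
--         for v in range(vertical):
--             for h in range(horizontal):
--                 yield v, h
--     else:
--         for h in range(horizontal):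
--             for v in range(vertical):
--                 yield v, h
-- ===== SOURCE B (Python) =====
-- def _filling(vertical: int, horizontal: int, fill_direction=0):
--     """Same 2D range generator, via a single flat-index loop decoded with divmod."""
--     vc = vertical if vertical > 0 else 0
--     hc = horizontal if horizontal > 0 else 0
--     if fill_direction:
--         for i in range(vc * hc):
--             yield divmod(i, hc)
--     else:
--         for i in range(vc * hc):
--             h, v = divmod(i, vc)
--             yield v, h
-- ===== Notes on version B (the rewrite author's own statement) =====
-- stated objective: alternative
-- what changed: Replaces the two nested range loops by a single loop over a flat index 0..vc*hc, decoding each index into the (v,h) pair with divmod.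
import Mathlib
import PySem

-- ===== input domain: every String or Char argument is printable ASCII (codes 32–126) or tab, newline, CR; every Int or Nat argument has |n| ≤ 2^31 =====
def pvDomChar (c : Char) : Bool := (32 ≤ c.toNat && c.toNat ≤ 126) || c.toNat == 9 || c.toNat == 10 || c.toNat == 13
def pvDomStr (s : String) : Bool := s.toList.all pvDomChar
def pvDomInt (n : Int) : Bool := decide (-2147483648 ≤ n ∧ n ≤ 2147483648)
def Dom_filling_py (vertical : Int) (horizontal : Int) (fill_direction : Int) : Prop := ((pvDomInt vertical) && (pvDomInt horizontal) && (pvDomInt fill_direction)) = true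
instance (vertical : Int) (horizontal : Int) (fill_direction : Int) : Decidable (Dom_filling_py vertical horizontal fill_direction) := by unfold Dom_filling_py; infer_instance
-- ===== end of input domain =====

-- B replaces A's two nested range loops by one loop over a flat index decoded with divmod
-- (objective: alternative decomposition, same cost); the generator's yields are ported as a list.

-- ===== PORT A =====
-- if fill_direction: for v in range(vertical): for h in range(horizontal): yield v, h
-- else:             for h in range(horizontal): for v in range(vertical): yield v, h
def filling_py (vertical : Int) (horizontal : Int) (fill_direction : Int) : List (Int × Int) :=
  if fill_direction ≠ 0 then
    (PySem.List.pyRange 0 vertical 1).flatMap (fun v =>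
      (PySem.List.pyRange 0 horizontal 1).map (fun h => (v, h)))
  else
    (PySem.List.pyRange 0 horizontal 1).flatMap (fun h =>
      (PySem.List.pyRange 0 vertical 1).map (fun v => (v, h)))

-- ===== PORT B =====
-- vc/hc clamp, then one loop over range(vc*hc) decoding each flat index with divmod
def filling_py_alt (vertical : Int) (horizontal : Int) (fill_direction : Int) : List (Int × Int) :=
  let vc : Int := if vertical > 0 then vertical else 0
  let hc : Int := if horizontal > 0 then horizontal else 0
  if fill_direction ≠ 0 then
    (PySem.List.pyRange 0 (vc * hc) 1).map (fun i =>
      (PySem.Int.floordiv i hc, PySem.Int.mod i hc))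
  else
    (PySem.List.pyRange 0 (vc * hc) 1).map (fun i =>
      (PySem.Int.mod i vc, PySem.Int.floordiv i vc))

-- ===== PRECONDITION & SPEC =====
def Spec_filling_py (vertical : Int) (horizontal : Int) (fill_direction : Int) (out : List (Int × Int)) : Prop := out = filling_py_alt vertical horizontal fill_direction
instance (vertical : Int) (horizontal : Int) (fill_direction : Int) (out : List (Int × Int)) : Decidable (Spec_filling_py vertical horizontal fill_direction out) := by unfold Spec_filling_py; infer_instance

-- ===== CLAIM (what is proved, stated in full; the proofs are below) =====
def Claim_equal_filling_py : Prop := ∀ (vertical : Int) (horizontal : Int) (fill_direction : Int), Dom_filling_py vertical horizontal fill_direction → Spec_filling_py vertical horizontal fill_direction (filling_py vertical horizontal fill_direction)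

-- ===== LEMMAS AND PROOFS =====

-- flat-index decoding of a nested loop over Nat ranges
theorem pvFlatIndex {α : Type} (m n : Nat) (f : Nat → Nat → α) :
    (List.range m).flatMap (fun v => (List.range n).map (fun h => f v h)) =
    (List.range (m * n)).map (fun i => f (i / n) (i % n)) := by
  rcases Nat.eq_zero_or_pos n with hn | hn
  · subst hn; simp
  · induction m with
    | zero => simp
    | succ m ih =>
      rw [List.range_succ, List.flatMap_append, ih,
        show (m + 1) * n = m * n + n by ring, List.range_add, List.map_append,
        List.map_map]
      congr 1
      simp only [List.flatMap_cons, List.flatMap_nil, List.append_nil]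
      refine List.map_congr_left (fun x hx => ?_)
      rw [List.mem_range] at hx
      have h1 : (m * n + x) / n = m := by
        rw [Nat.mul_comm, Nat.add_comm, Nat.add_mul_div_left _ _ hn,
          Nat.div_eq_of_lt hx]
        omega
      have h2 : (m * n + x) % n = x := by
        rw [Nat.mul_comm, Nat.add_comm, Nat.add_mul_mod_self_left,
          Nat.mod_eq_of_lt hx]
      simp [Function.comp, h1, h2]

theorem pvClampToNat (x : Int) : (if x > 0 then x else 0) = ((x.toNat : Nat) : Int) := by
  rw [Int.ofNat_toNat]; split_ifs <;> omega

theorem pvMain {α : Type} (m n : Nat) (f : Int → Int → α) :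
    ((List.range m).map (fun (k : Nat) => (k : Int))).flatMap (fun v =>
      ((List.range n).map (fun (k : Nat) => (k : Int))).map (fun h => f v h)) =
    ((List.range (m * n)).map (fun (k : Nat) => (k : Int))).map (fun i =>
      f (PySem.Int.floordiv i (n : Int)) (PySem.Int.mod i (n : Int))) := by
  rw [List.flatMap_map, List.map_map]
  simp only [Function.comp_def, List.map_map]
  rw [pvFlatIndex m n (fun v h => f (v : Int) (h : Int))]
  refine List.map_congr_left (fun i _ => ?_)
  simp [PySem.Int.floordiv_natCast, PySem.Int.mod_natCast]

theorem filling_py_eq_alt (vertical horizontal fill_direction : Int) :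
    filling_py vertical horizontal fill_direction =
    filling_py_alt vertical horizontal fill_direction := by
  simp only [filling_py, filling_py_alt]
  rw [pvClampToNat vertical, pvClampToNat horizontal,
    PySem.List.pyRange_zero vertical, PySem.List.pyRange_zero horizontal]
  split_ifs with hf
  · rw [show ((vertical.toNat : Int) * (horizontal.toNat : Int))
        = ((vertical.toNat * horizontal.toNat : Nat) : Int) by push_cast; ring,
      PySem.List.pyRange_zero_natCast]
    exact pvMain vertical.toNat horizontal.toNat (fun v h => (v, h))
  · rw [show ((vertical.toNat : Int) * (horizontal.toNat : Int))
        = ((horizontal.toNat * vertical.toNat : Nat) : Int) by push_cast; ring,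
      PySem.List.pyRange_zero_natCast]
    exact pvMain horizontal.toNat vertical.toNat (fun h v => (v, h))

-- ===== VERDICT (by name: the statement is the Claim_ definition above) =====
theorem filling_py_spec : Claim_equal_filling_py := by
  intro vertical horizontal fill_direction _
  exact filling_py_eq_alt vertical horizontal fill_direction
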